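-- pv_equiv track=rewrite | github.com/pypi-data/pypi-mirror-402 | packages/snapctl/snapctl-1.4.1-py3-none-any.whl/snapctl/commands/snapend.py | _make_byosnap_list
-- ===== SOURCE A (Python) =====
-- def _make_byosnap_list(byosnaps: str) -> list:
--     byosnap_list = []
--     for byosnap in byosnaps.split(','):
--         byosnap = byosnap.strip()
--         if len(byosnap.split(':')) != 2:
--             return []
--         byosnap_list.append({
--             'service_id': byosnap.split(':')[0],
--             'service_version': byosnap.split(':')[1]
--         })
--     return byosnap_list
-- ===== SOURCE B (Python) =====
-- def _make_byosnap_list(byosnaps: str) -> list: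
--     # Single pass over the characters (with a comma sentinel appended): a small state
--     # machine tracks the id seen before the colon (sid), the current field (buf) and a run
--     # of not-yet-committed whitespace (pend, so that strip()-style edge trimming
--     # falls out of the scan).  No split()/strip() calls at all.
--     out = []
--     sid = None
--     buf = ''
--     pend = ''
--     for ch in byosnaps + ',':
--         if ch == ',':
--             if sid is None:
--                 return []
--             out.append({'service_id': sid, 'service_version': buf})
--             sid, buf, pend = None, '', ''
--         elif ch == ':':
--             if sid is not None:
--                 return []
--             sid = '' if buf == '' else buf + pend
--             buf, pend = '', ''
--         elif ch.isspace():
--             pend += ch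
--         else:
--             buf = ((buf + pend) if (sid is not None or buf != '') else '') + ch
--             pend = ''
--     return out
-- ===== Notes on version B (the rewrite author's own statement) =====
-- stated objective: alternative
-- what changed: Replaces A's comma-split / strip / per-item colon-split passes by a single character-level state machine pass that builds the id and version fields (and does the strip-style edge trimming) directly while scanning the input once.
import Mathlib
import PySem

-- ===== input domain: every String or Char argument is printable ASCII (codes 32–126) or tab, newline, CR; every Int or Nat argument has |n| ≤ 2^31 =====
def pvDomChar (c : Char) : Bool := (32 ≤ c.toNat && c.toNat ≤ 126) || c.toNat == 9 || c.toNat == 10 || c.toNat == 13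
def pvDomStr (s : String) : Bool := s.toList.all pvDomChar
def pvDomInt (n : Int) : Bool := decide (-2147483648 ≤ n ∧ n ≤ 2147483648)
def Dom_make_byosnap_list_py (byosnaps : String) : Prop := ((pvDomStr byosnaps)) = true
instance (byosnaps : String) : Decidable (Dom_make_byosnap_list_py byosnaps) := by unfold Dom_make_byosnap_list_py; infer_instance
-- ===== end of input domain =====

-- B replaces A's comma-split/strip/colon-split passes by ONE character-level state-machine
-- pass over the input; objective: alternative (a different algorithm of similar cost).


-- ===== PORT A =====
-- s.split(sep) for a nonempty literal sep (split? is some exactly when sep ≠ "")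
def pySplit (s sep : String) : List String := (PySem.Str.split? s sep).getD []

-- A's loop over byosnaps.split(','): strip, validate, append one dict at a time;
-- the first invalid item returns [] immediately
def makeByosnapGoA : List String → List (List (String × String)) → List (List (String × String))
  | [], acc => acc
  | b :: rest, acc =>
    let b' := PySem.Str.strip b
    if (pySplit b' ":").length ≠ 2 then []
    else makeByosnapGoA rest
      (acc ++ [[("service_id", (pySplit b' ":").getD 0 ""),
                ("service_version", (pySplit b' ":").getD 1 "")]])

def make_byosnap_list_py (byosnaps : String) : List (List (String × String)) :=
  makeByosnapGoA (pySplit byosnaps ",") []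

-- ===== PORT B =====
-- Source B's state machine: for ch in byosnaps + ',' with state (sid, buf, pend);
-- early 'return []' becomes the non-recursive [] branches
def mbGoB : List Char → Option (List Char) → List Char → List Char →
    List (List (String × String)) → List (List (String × String))
  | [], _, _, _, out => out
  | c :: cs, sid, buf, pend, out =>
    if c = ',' then
      match sid with
      | none => []
      | some a => mbGoB cs none [] []
          (out ++ [[("service_id", String.ofList a), ("service_version", String.ofList buf)]])
    else if c = ':' then
      match sid with
      | some _ => []
      | none => mbGoB cs (some (if buf = [] then [] else buf ++ pend)) [] [] out
    else if PySem.Chars.isspace c then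
      mbGoB cs sid buf (pend ++ [c]) out
    else
      mbGoB cs sid ((if sid.isSome ∨ buf ≠ [] then buf ++ pend else []) ++ [c]) [] out

def make_byosnap_list_py_alt (byosnaps : String) : List (List (String × String)) :=
  mbGoB (byosnaps.toList ++ [',']) none [] [] []

-- ===== PRECONDITION & SPEC =====
def Spec_make_byosnap_list_py (byosnaps : String) (out : List (List (String × String))) : Prop := out = make_byosnap_list_py_alt byosnaps
instance (byosnaps : String) (out : List (List (String × String))) : Decidable (Spec_make_byosnap_list_py byosnaps out) := by unfold Spec_make_byosnap_list_py; infer_instance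

-- ===== CLAIM (what is proved, stated in full; the proofs are below) =====
def Claim_equal_make_byosnap_list_py : Prop := ∀ (byosnaps : String), Dom_make_byosnap_list_py byosnaps → Spec_make_byosnap_list_py byosnaps (make_byosnap_list_py byosnaps)

-- ===== LEMMAS AND PROOFS =====

-- A's loop restated on the char level (proved equal to A in lemma A_eq_runA)
def runA : List (List Char) → List (List (String × String)) → List (List (String × String))
  | [], out => out
  | seg :: rest, out =>
    let ps := PySem.Chars.splitOn (PySem.Chars.strip seg) [':']
    if ps.length ≠ 2 then []
    else runA rest (out ++ [[("service_id", String.ofList (ps.getD 0 [])),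
                            ("service_version", String.ofList (ps.getD 1 []))]])

-- the first comma-free chunk of cs, and the chunks after the first comma
def seg0 (cs : List Char) : List Char := cs.takeWhile (· ≠ ',')
def restSegs (cs : List Char) : List (List Char) :=
  if ',' ∈ cs then PySem.Chars.splitOn ((cs.dropWhile (· ≠ ',')).tail) [','] else []

-- the characters of the current segment the machine state stands for
def recon (sid : Option (List Char)) (buf pend : List Char) : List Char :=
  (match sid with | some a => a ++ [':'] | none => []) ++ buf ++ pend

-- machine-state invariant
def MInv (sid : Option (List Char)) (buf pend : List Char) : Prop :=
  (∀ x ∈ pend, PySem.Chars.isspace x) ∧ ':' ∉ buf ∧ ',' ∉ buf ∧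
  ¬ PySem.Chars.isspace (buf.getLastD 'x') ∧
  (sid = none → ¬ PySem.Chars.isspace (buf.headD 'x')) ∧
  (∀ a, sid = some a → ':' ∉ a ∧ ',' ∉ a ∧ ¬ PySem.Chars.isspace (a.headD 'x'))

-- ---- splitOn.go / strip / segment facts ----
lemma go_no_sep (c : Char) : ∀ (l : List Char) (fuel : Nat) (cur : List Char)
    (acc : List (List Char)), c ∉ l →
    PySem.Chars.splitOn.go [c] fuel l cur acc = ((cur.reverse ++ l) :: acc).reverse := by
  intro l
  induction l with
  | nil => intro fuel cur acc _; cases fuel <;> simp [PySem.Chars.splitOn.go]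
  | cons x rest ih =>
    intro fuel cur acc h
    simp only [List.mem_cons, not_or] at h
    cases fuel with
    | zero => simp [PySem.Chars.splitOn.go]
    | succ f =>
      rw [PySem.Chars.splitOn.go]
      have hx : [c].isPrefixOf (x :: rest) = false := by
        simp [List.isPrefixOf]; exact fun hc => h.1 hc
      rw [hx]
      simp only [Bool.false_eq_true, if_false]
      rw [ih f (x :: cur) acc h.2]
      simp

lemma go_acc (c : Char) : ∀ (fuel : Nat) (l cur : List Char) (acc : List Char)
    (accs : List (List Char)),
    PySem.Chars.splitOn.go [c] fuel l cur (acc :: accs)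
      = accs.reverse ++ acc :: PySem.Chars.splitOn.go [c] fuel l cur [] := by
  intro fuel
  induction fuel with
  | zero => intro l cur acc accs; simp [PySem.Chars.splitOn.go]
  | succ f ih =>
    intro l cur acc accs
    cases l with
    | nil => simp [PySem.Chars.splitOn.go]
    | cons x rest =>
      rw [PySem.Chars.splitOn.go, PySem.Chars.splitOn.go]
      by_cases hx : [c].isPrefixOf (x :: rest)
      · rw [if_pos hx, if_pos hx, ih, ih _ _ (cur.reverse) []]
        simp
      · rw [if_neg hx, if_neg hx, ih]

lemma go_prefix (c : Char) : ∀ (p : List Char) (fuel : Nat) (l cur : List Char)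
    (acc : List (List Char)), c ∉ p → p.length ≤ fuel →
    PySem.Chars.splitOn.go [c] fuel (p ++ l) cur acc
      = PySem.Chars.splitOn.go [c] (fuel - p.length) l (p.reverse ++ cur) acc := by
  intro p
  induction p with
  | nil => intro fuel l cur acc _ _; simp
  | cons x rest ih =>
    intro fuel l cur acc h hf
    simp only [List.mem_cons, not_or] at h
    cases fuel with
    | zero => simp at hf
    | succ f =>
      rw [List.cons_append, PySem.Chars.splitOn.go]
      have hx : [c].isPrefixOf (x :: (rest ++ l)) = false := by
        simp [List.isPrefixOf]; exact fun hc => h.1 hc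
      rw [hx]
      simp only [Bool.false_eq_true, if_false]
      rw [ih f l (x :: cur) acc h.2 (by simpa using hf)]
      simp [Nat.succ_sub_succ]

lemma go_length (c : Char) : ∀ (l : List Char) (fuel : Nat) (cur : List Char)
    (acc : List (List Char)), l.length ≤ fuel →
    (PySem.Chars.splitOn.go [c] fuel l cur acc).length = l.count c + 1 + acc.length := by
  intro l
  induction l with
  | nil => intro fuel cur acc _; cases fuel <;> simp [PySem.Chars.splitOn.go] <;> omega
  | cons x rest ih =>
    intro fuel cur acc hf
    cases fuel with
    | zero => simp at hf
    | succ f =>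
      rw [PySem.Chars.splitOn.go]
      by_cases hx : [c].isPrefixOf (x :: rest)
      · have hcx : x = c := (by simpa [List.isPrefixOf] using hx : c = x).symm
        rw [if_pos hx]
        simp only [List.length_cons, List.drop_succ_cons, List.length_nil, List.drop_zero]
        simp only [List.length_cons] at hf
        rw [ih f [] (cur.reverse :: acc) (by simpa using hf)]
        simp [hcx]; omega
      · have hcx : ¬ x = c := by
          intro hc; exact hx (by simp [List.isPrefixOf, hc])
        rw [if_neg hx, ih f (x :: cur) acc (by simpa using hf)]
        simp [hcx]

lemma splitOn_no_sep {c : Char} {l : List Char} (h : c ∉ l) :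
    PySem.Chars.splitOn l [c] = [l] := by
  rw [PySem.Chars.splitOn, go_no_sep c l _ [] [] h]; simp

lemma splitOn_sep {c : Char} {a : List Char} (b : List Char) (h : c ∉ a) :
    PySem.Chars.splitOn (a ++ c :: b) [c] = a :: PySem.Chars.splitOn b [c] := by
  rw [PySem.Chars.splitOn,
    go_prefix c a ((a ++ c :: b).length + 1) (c :: b) [] [] h (by simp; omega)]
  have hl : (a ++ c :: b).length + 1 - a.length = b.length + 2 := by simp; omega
  rw [hl, PySem.Chars.splitOn.go]
  have hx : [c].isPrefixOf (c :: b) = true := by simp [List.isPrefixOf]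
  rw [if_pos hx]
  simp only [List.length_cons, List.drop_succ_cons, List.length_nil, List.drop_zero,
    List.append_nil, List.reverse_reverse]
  rw [go_acc, PySem.Chars.splitOn]
  simp

lemma splitOn_length (c : Char) (l : List Char) :
    (PySem.Chars.splitOn l [c]).length = l.count c + 1 := by
  rw [PySem.Chars.splitOn, go_length c l _ [] [] (by omega)]; simp

lemma splitOn_head (c : Char) (cs : List Char) :
    PySem.Chars.splitOn cs [c] =
      cs.takeWhile (· ≠ c) ::
        (if c ∈ cs then PySem.Chars.splitOn ((cs.dropWhile (· ≠ c)).tail) [c] else []) := by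
  by_cases hm : c ∈ cs
  · rw [if_pos hm]
    have hd : cs.dropWhile (· ≠ c) ≠ [] := by
      intro hnil
      have := List.takeWhile_append_dropWhile (p := (· ≠ c)) (l := cs)
      rw [hnil, List.append_nil] at this
      rw [← this] at hm
      have := List.mem_takeWhile_imp hm
      simp at this
    have hhead : (cs.dropWhile (· ≠ c)).head hd = c := by
      have := List.head_dropWhile_not (p := (· ≠ c)) (l := cs) hd
      simpa using this
    have hdec : cs = cs.takeWhile (· ≠ c) ++ c :: (cs.dropWhile (· ≠ c)).tail := by
      conv_lhs => rw [← List.takeWhile_append_dropWhile (p := (· ≠ c)) (l := cs)]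
      congr 1
      conv_lhs => rw [← List.cons_head_tail hd]
      rw [hhead]
    conv_lhs => rw [hdec]
    rw [splitOn_sep _ (fun hx => by simpa using List.mem_takeWhile_imp hx)]
  · rw [if_neg hm, splitOn_no_sep hm, List.takeWhile_eq_self_iff.mpr]
    intro x hx
    simp
    exact fun h => hm (h ▸ hx)

lemma lstrip_ws_prefix {p : List Char} (r : List Char)
    (h : ∀ x ∈ p, PySem.Chars.isspace x) :
    PySem.Chars.lstrip (p ++ r) = PySem.Chars.lstrip r := by
  induction p with
  | nil => simp
  | cons x rest ih =>
    rw [PySem.Chars.lstrip, List.cons_append, List.dropWhile_cons_of_pos (by simp [h x (by simp)])]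
    exact ih (fun y hy => h y (by simp [hy]))

lemma lstrip_id {l : List Char} (h : ¬ PySem.Chars.isspace (l.headD 'x')) :
    PySem.Chars.lstrip l = l := by
  cases l with
  | nil => rfl
  | cons x rest =>
    rw [PySem.Chars.lstrip, List.dropWhile_cons_of_neg (by simpa using h)]

lemma rstrip_ws_suffix {p : List Char} (u : List Char)
    (h : ∀ x ∈ p, PySem.Chars.isspace x) :
    PySem.Chars.rstrip (u ++ p) = PySem.Chars.rstrip u := by
  rw [PySem.Chars.rstrip, PySem.Chars.rstrip, List.reverse_append]
  rw [show List.dropWhile PySem.Chars.isspace (p.reverse ++ u.reverse)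
      = List.dropWhile PySem.Chars.isspace u.reverse from
    lstrip_ws_prefix u.reverse (fun x hx => h x (by simpa using hx))]

lemma rstrip_id {l : List Char} (h : ¬ PySem.Chars.isspace (l.getLastD 'x')) :
    PySem.Chars.rstrip l = l := by
  have h2 : PySem.Chars.lstrip l.reverse = l.reverse := lstrip_id (by
    cases l with
    | nil => simpa using h
    | cons x rest =>
      have hr : (x :: rest).reverse.headD 'x' = (x :: rest).getLastD 'x' := by
        rw [List.getLastD_eq_getLast?, ← List.head?_reverse]
        cases hh : (x :: rest).reverse with
        | nil => simp at hh
        | cons y t => simp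
      rw [hr]; exact h)
  rw [PySem.Chars.lstrip] at h2
  rw [PySem.Chars.rstrip, h2, List.reverse_reverse]

lemma strip_sublist (l : List Char) : List.Sublist (PySem.Chars.strip l) l := by
  rw [PySem.Chars.strip]
  have h1 : List.Sublist (PySem.Chars.lstrip l) l := by
    rw [PySem.Chars.lstrip]; exact List.dropWhile_sublist _
  have h2 : List.Sublist (PySem.Chars.rstrip (PySem.Chars.lstrip l)) (PySem.Chars.lstrip l) := by
    rw [PySem.Chars.rstrip]
    have h3 := List.dropWhile_sublist (l := (PySem.Chars.lstrip l).reverse) (p := PySem.Chars.isspace)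
    simpa using h3.reverse
  exact h2.trans h1

lemma count_strip {c : Char} (l : List Char) (h : ¬ PySem.Chars.isspace c) :
    (PySem.Chars.strip l).count c = l.count c := by
  have key : ∀ m : List Char, (List.dropWhile PySem.Chars.isspace m).count c = m.count c := by
    intro m
    induction m with
    | nil => rfl
    | cons x rest ih =>
      by_cases hx : PySem.Chars.isspace x
      · rw [List.dropWhile_cons_of_pos hx, ih, List.count_cons]
        have : ¬ x = c := fun hh => h (hh ▸ hx)
        simp [this]
      · rw [List.dropWhile_cons_of_neg hx]
  rw [PySem.Chars.strip, PySem.Chars.rstrip, PySem.Chars.lstrip]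
  rw [List.count_reverse, key, List.count_reverse, key]

lemma strip_ws_prefix {p : List Char} (r : List Char)
    (h : ∀ x ∈ p, PySem.Chars.isspace x) :
    PySem.Chars.strip (p ++ r) = PySem.Chars.strip r := by
  rw [PySem.Chars.strip, PySem.Chars.strip, lstrip_ws_prefix r h]

lemma seg_invalid {buf pend : List Char} (h1 : ':' ∉ buf)
    (h2 : ∀ x ∈ pend, PySem.Chars.isspace x) :
    (PySem.Chars.splitOn (PySem.Chars.strip (buf ++ pend)) [':']).length = 1 := by
  rw [splitOn_length]
  have : ':' ∉ PySem.Chars.strip (buf ++ pend) := by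
    intro hm
    have := (strip_sublist (buf ++ pend)).mem hm
    rcases List.mem_append.mp this with h | h
    · exact h1 h
    · exact (by decide : ¬ PySem.Chars.isspace ':') (h2 _ h)
  rw [List.count_eq_zero.mpr this]

lemma seg_valid {a buf pend : List Char} (ha : ':' ∉ a) (hb : ':' ∉ buf)
    (hp : ∀ x ∈ pend, PySem.Chars.isspace x)
    (hah : ¬ PySem.Chars.isspace (a.headD 'x'))
    (hbl : ¬ PySem.Chars.isspace (buf.getLastD 'x')) :
    PySem.Chars.splitOn (PySem.Chars.strip (a ++ ':' :: buf ++ pend)) [':'] = [a, buf] := by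
  have hstrip : PySem.Chars.strip (a ++ ':' :: buf ++ pend) = a ++ ':' :: buf := by
    rw [PySem.Chars.strip]
    have hls : PySem.Chars.lstrip (a ++ ':' :: buf ++ pend) = a ++ ':' :: buf ++ pend := by
      apply lstrip_id
      cases a with
      | nil => intro hc; simp at hc; exact absurd hc (by decide)
      | cons x rest => simpa using hah
    rw [hls, show a ++ ':' :: buf ++ pend = (a ++ ':' :: buf) ++ pend by simp,
      rstrip_ws_suffix _ hp]
    apply rstrip_id
    cases buf with
    | nil =>
      intro hc
      rw [List.getLastD_eq_getLast?, List.getLast?_concat] at hc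
      simp at hc
      exact absurd hc (by decide)
    | cons y t =>
      rw [show a ++ ':' :: y :: t = (a ++ [':']) ++ y :: t by simp, List.getLastD_eq_getLast?,
        List.getLast?_append_of_ne_nil (a ++ [':']) (by simp : (y :: t : List Char) ≠ [])]
      rw [List.getLastD_eq_getLast?] at hbl
      exact hbl
  rw [hstrip, show a ++ ':' :: buf = a ++ [':'] ++ buf by simp]
  rw [show a ++ [':'] ++ buf = a ++ ':' :: buf by simp, splitOn_sep _ ha, splitOn_no_sep hb]

-- ---- the main correspondence ----

lemma headD_append_of_ne_nil {l : List Char} (r : List Char) (d : Char) (h : l ≠ []) :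
    (l ++ r).headD d = l.headD d := by
  cases l with
  | nil => exact absurd rfl h
  | cons x t => rfl

lemma runA_cons_strip {s s' : List Char} (r : List (List Char))
    (out : List (List (String × String))) (h : PySem.Chars.strip s = PySem.Chars.strip s') :
    runA (s :: r) out = runA (s' :: r) out := by
  simp only [runA, h]

lemma seg0_comma (cs : List Char) : seg0 (',' :: cs) = [] := by
  simp [seg0]

lemma seg0_cons {c : Char} (cs : List Char) (h : c ≠ ',') : seg0 (c :: cs) = c :: seg0 cs := by
  simp [seg0, h]

lemma restSegs_comma (cs : List Char) : restSegs (',' :: cs) = PySem.Chars.splitOn cs [','] := by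
  simp [restSegs]

lemma restSegs_cons {c : Char} (cs : List Char) (h : c ≠ ',') :
    restSegs (c :: cs) = restSegs cs := by
  have h2 : ¬ (',' = c) := fun hh => h hh.symm
  simp only [restSegs, List.mem_cons, h2, false_or]
  rw [List.dropWhile_cons_of_pos (by simp [h])]

lemma splitOn_comma_eq (cs : List Char) :
    PySem.Chars.splitOn cs [','] = seg0 cs :: restSegs cs := by
  rw [splitOn_head ',' cs]; rfl

-- A's per-segment test and values, packaged for the valid and invalid state shapes
lemma runA_invalid {buf pend : List Char} (r : List (List Char))
    (out : List (List (String × String))) (h1 : ':' ∉ buf)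
    (h2 : ∀ x ∈ pend, PySem.Chars.isspace x) :
    runA ((buf ++ pend) :: r) out = [] := by
  simp only [runA]
  rw [if_pos (by rw [seg_invalid h1 h2]; omega)]

lemma runA_valid {a buf pend : List Char} (r : List (List Char))
    (out : List (List (String × String))) (ha : ':' ∉ a) (hb : ':' ∉ buf)
    (hp : ∀ x ∈ pend, PySem.Chars.isspace x)
    (hah : ¬ PySem.Chars.isspace (a.headD 'x'))
    (hbl : ¬ PySem.Chars.isspace (buf.getLastD 'x')) :
    runA ((a ++ ':' :: buf ++ pend) :: r) out
      = runA r (out ++ [[("service_id", String.ofList a), ("service_version", String.ofList buf)]]) := by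
  simp only [runA]
  rw [seg_valid ha hb hp hah hbl]
  simp

lemma runA_two_colons {u v w : List Char} (r : List (List Char))
    (out : List (List (String × String))) :
    runA ((u ++ ':' :: v ++ ':' :: w) :: r) out = [] := by
  simp only [runA]
  rw [if_pos ?_]
  rw [splitOn_length, count_strip _ (by decide)]
  simp [List.count_append]
  omega

lemma mbGoB_comma_none (cs buf pend : List Char) (out : List (List (String × String))) :
    mbGoB (',' :: cs) none buf pend out = [] := by
  simp [mbGoB]

lemma mbGoB_comma_some (cs : List Char) (a buf pend : List Char)
    (out : List (List (String × String))) :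
    mbGoB (',' :: cs) (some a) buf pend out
      = mbGoB cs none [] []
          (out ++ [[("service_id", String.ofList a), ("service_version", String.ofList buf)]]) := by
  simp [mbGoB]

lemma mbGoB_colon_some (cs : List Char) (a buf pend : List Char)
    (out : List (List (String × String))) :
    mbGoB (':' :: cs) (some a) buf pend out = [] := by
  simp [mbGoB]

lemma mbGoB_colon_none (cs buf pend : List Char) (out : List (List (String × String))) :
    mbGoB (':' :: cs) none buf pend out
      = mbGoB cs (some (if buf = [] then [] else buf ++ pend)) [] [] out := by
  simp [mbGoB]

lemma mbGoB_ws {c : Char} (cs : List Char) (sid : Option (List Char)) (buf pend : List Char)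
    (out : List (List (String × String))) (h1 : c ≠ ',') (h2 : c ≠ ':')
    (h3 : PySem.Chars.isspace c) :
    mbGoB (c :: cs) sid buf pend out = mbGoB cs sid buf (pend ++ [c]) out := by
  simp [mbGoB, h1, h2, h3]

lemma mbGoB_char {c : Char} (cs : List Char) (sid : Option (List Char)) (buf pend : List Char)
    (out : List (List (String × String))) (h1 : c ≠ ',') (h2 : c ≠ ':')
    (h3 : ¬ PySem.Chars.isspace c) :
    mbGoB (c :: cs) sid buf pend out
      = mbGoB cs sid ((if sid.isSome ∨ buf ≠ [] then buf ++ pend else []) ++ [c]) [] out := by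
  simp [mbGoB, h1, h2, h3]

lemma main_lemma : ∀ (cs : List Char) (sid : Option (List Char)) (buf pend : List Char)
    (out : List (List (String × String))), MInv sid buf pend →
    mbGoB (cs ++ [',']) sid buf pend out
      = runA ((recon sid buf pend ++ seg0 cs) :: restSegs cs) out := by
  intro cs
  induction cs with
  | nil =>
    intro sid buf pend out hI
    obtain ⟨hp, hb1, hb2, hbl, hbh, hsid⟩ := hI
    cases sid with
    | none =>
      show mbGoB [','] none buf pend out = _
      rw [mbGoB_comma_none]
      rw [show recon none buf pend ++ seg0 [] = buf ++ pend by simp [recon, seg0],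
        show restSegs [] = [] from rfl, runA_invalid _ _ hb1 hp]
    | some a =>
      obtain ⟨ha1, ha2, hah⟩ := hsid a rfl
      show mbGoB [','] (some a) buf pend out = _
      rw [mbGoB_comma_some]
      rw [show mbGoB [] none [] [] (out ++ [[("service_id", String.ofList a), ("service_version", String.ofList buf)]]) = out ++ [[("service_id", String.ofList a), ("service_version", String.ofList buf)]] from rfl]
      rw [show recon (some a) buf pend ++ seg0 [] = a ++ ':' :: buf ++ pend by simp [recon, seg0],
        show restSegs [] = [] from rfl, runA_valid _ _ ha1 hb1 hp hah hbl]
      rfl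
  | cons c cs ih =>
    intro sid buf pend out hI
    obtain ⟨hp, hb1, hb2, hbl, hbh, hsid⟩ := hI
    rw [List.cons_append]
    by_cases hc : c = ','
    · subst hc
      cases sid with
      | none =>
        rw [mbGoB_comma_none]
        rw [seg0_comma, show recon none buf pend ++ [] = buf ++ pend by simp [recon],
          runA_invalid _ _ hb1 hp]
      | some a =>
        obtain ⟨ha1, ha2, hah⟩ := hsid a rfl
        rw [mbGoB_comma_some]
        rw [ih none [] [] _ ⟨by simp, by simp, by simp, by decide, fun _ => by decide,
            fun a h => by simp at h⟩,
          seg0_comma, show recon (some a) buf pend ++ [] = a ++ ':' :: buf ++ pend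
            by simp [recon],
          runA_valid _ _ ha1 hb1 hp hah hbl, restSegs_comma, splitOn_comma_eq]
        rfl
    · by_cases hcol : c = ':'
      · subst hcol
        cases sid with
        | some a =>
          rw [mbGoB_colon_some]
          rw [seg0_cons cs hc,
            show recon (some a) buf pend ++ ':' :: seg0 cs
              = a ++ ':' :: (buf ++ pend) ++ ':' :: seg0 cs by simp [recon],
            runA_two_colons]
        | none =>
          rw [mbGoB_colon_none]
          by_cases hbuf : buf = []
          · subst hbuf
            rw [if_pos rfl,
              ih (some []) [] [] _ ⟨by simp, by simp, by simp, by decide,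
                fun _ => by decide, fun a h => by
                  injection h with h2
                  subst h2
                  exact ⟨by simp, by simp, by decide⟩⟩,
              seg0_cons cs hc, restSegs_cons cs hc,
              show recon (some []) [] [] ++ seg0 cs = ':' :: seg0 cs by simp [recon],
              show recon none [] pend ++ ':' :: seg0 cs = pend ++ ':' :: seg0 cs
                by simp [recon]]
            exact (runA_cons_strip _ _ (strip_ws_prefix _ hp)).symm
          · rw [if_neg hbuf,
              ih (some (buf ++ pend)) [] [] _ ⟨by simp, by simp, by simp, by decide,
                fun _ => by decide, fun a h => by
                  injection h with h2
                  rw [← h2]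
                  refine ⟨?_, ?_, ?_⟩
                  · intro hm
                    rcases List.mem_append.mp hm with hm | hm
                    · exact hb1 hm
                    · exact (by decide : ¬ PySem.Chars.isspace ':') (hp _ hm)
                  · intro hm
                    rcases List.mem_append.mp hm with hm | hm
                    · exact hb2 hm
                    · exact (by decide : ¬ PySem.Chars.isspace ',') (hp _ hm)
                  · rw [headD_append_of_ne_nil _ _ hbuf]; exact hbh rfl⟩,
              seg0_cons cs hc, restSegs_cons cs hc]
            congr 2
            simp [recon]
      · by_cases hws : PySem.Chars.isspace c
        · rw [mbGoB_ws (cs ++ [',']) sid buf pend out hc hcol hws]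
          rw [ih sid buf (pend ++ [c]) _ ⟨fun x hx => by
                rcases List.mem_append.mp hx with hx | hx
                · exact hp _ hx
                · simpa using (by simpa using hx : x = c) ▸ hws,
              hb1, hb2, hbl, hbh, hsid⟩,
            seg0_cons cs hc, restSegs_cons cs hc]
          congr 2
          simp [recon]
        · rw [mbGoB_char (cs ++ [',']) sid buf pend out hc hcol hws]
          by_cases hst : sid.isSome ∨ buf ≠ []
          · rw [if_pos hst,
              ih sid (buf ++ pend ++ [c]) [] _ ⟨by simp, by
                  intro hm
                  rcases List.mem_append.mp hm with hm | hm
                  · rcases List.mem_append.mp hm with hm | hm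
                    · exact hb1 hm
                    · exact (by decide : ¬ PySem.Chars.isspace ':') (hp _ hm)
                  · simp at hm; exact hcol hm.symm, by
                  intro hm
                  rcases List.mem_append.mp hm with hm | hm
                  · rcases List.mem_append.mp hm with hm | hm
                    · exact hb2 hm
                    · exact (by decide : ¬ PySem.Chars.isspace ',') (hp _ hm)
                  · simp at hm; exact hc hm.symm, by
                  rw [List.getLastD_eq_getLast?, List.getLast?_concat]
                  simpa using hws, by
                  intro hn
                  have hbne : buf ≠ [] := by
                    rcases hst with hs | hs
                    · rw [hn] at hs; simp at hs
                    · exact hs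
                  rw [show buf ++ pend ++ [c] = buf ++ (pend ++ [c]) by simp,
                    headD_append_of_ne_nil _ _ hbne]
                  exact hbh hn, hsid⟩,
              seg0_cons cs hc, restSegs_cons cs hc]
            congr 2
            simp [recon]
          · rw [if_neg hst]
            push Not at hst
            obtain ⟨hs1, hs2⟩ := hst
            have hsn : sid = none := by
              cases sid with
              | none => rfl
              | some a => simp at hs1
            subst hsn; subst hs2
            rw [show ([] : List Char) ++ [c] = [c] from rfl, ih none [c] [] _ ⟨by simp, by simpa using fun h => hcol h.symm,
                by simpa using fun h => hc h.symm, by simpa using hws,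
                fun _ => by simpa using hws, fun a h => by simp at h⟩,
              seg0_cons cs hc, restSegs_cons cs hc,
              show recon none [c] [] ++ seg0 cs = c :: seg0 cs by simp [recon],
              show recon none [] pend ++ c :: seg0 cs = pend ++ c :: seg0 cs by simp [recon]]
            exact (runA_cons_strip _ _ (strip_ws_prefix _ hp)).symm

lemma pySplit_toList (s sep : String) (h : sep.toList ≠ []) :
    pySplit s sep = (PySem.Chars.splitOn s.toList sep.toList).map String.ofList := by
  rw [pySplit, PySem.Str.split?, PySem.Chars.split?]
  simp [h]

lemma A_eq_runA : ∀ (l : List (List Char)) (out : List (List (String × String))),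
    makeByosnapGoA (l.map String.ofList) out = runA l out := by
  intro l
  induction l with
  | nil => intro out; rfl
  | cons seg rest ih =>
    intro out
    rw [List.map_cons, makeByosnapGoA]
    have hstrip : PySem.Str.strip (String.ofList seg) = String.ofList (PySem.Chars.strip seg) := by
      rw [PySem.Str.strip]; simp
    have hsplit : pySplit (PySem.Str.strip (String.ofList seg)) ":"
        = (PySem.Chars.splitOn (PySem.Chars.strip seg) [':']).map String.ofList := by
      rw [hstrip, pySplit_toList _ _ (by decide)]
      simp
    simp only [hsplit, List.length_map, runA]
    by_cases hlen : (PySem.Chars.splitOn (PySem.Chars.strip seg) [':']).length ≠ 2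
    · rw [if_pos hlen, if_pos hlen]
    · rw [if_neg hlen, if_neg hlen]
      push Not at hlen
      obtain ⟨x, y, hxy⟩ := List.length_eq_two.mp hlen
      rw [hxy]
      simpa using ih _

lemma split_comma (s : String) :
    pySplit s "," = (PySem.Chars.splitOn s.toList [',']).map String.ofList := by
  rw [pySplit_toList _ _ (by decide)]
  rfl

-- ===== VERDICT (by name: the statement is the Claim_ definition above) =====
theorem make_byosnap_list_py_spec : Claim_equal_make_byosnap_list_py := by
  intro s _
  unfold Spec_make_byosnap_list_py make_byosnap_list_py make_byosnap_list_py_alt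
  rw [split_comma, A_eq_runA, main_lemma s.toList none [] [] []
    (by refine ⟨by simp, by simp, by simp, by decide, fun _ => by decide, fun a h => by simp at h⟩),
    splitOn_head ',' s.toList]
  rfl
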